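-- pv_equiv track=rewrite | github.com/pullenti/PullentiPython | pullenti/ner/org/OrganizationReferent.py | __check_acronym
-- ===== SOURCE A (Python) =====
-- def __check_acronym(acr : str, text : str) -> bool:
--     i = 0
--     j = 0
--     i = 0
--     while i < len(acr):
--         while j < len(text):
--             if (text[j] == acr[i]):
--                 break
--             j += 1
--         if (j >= len(text)):
--             break
--         j += 1
--         i += 1
--     return i >= len(acr)
-- ===== SOURCE B (Python) =====
-- def __check_acronym(acr : str, text : str) -> bool:
--     # Build an index: character -> sorted list of its positions in text (one pass),
--     # then for each acronym character binary-search the first position after the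
--     # previous match.  Greedy earliest matching, so same result as a linear scan.
--     pos = {}
--     for idx, ch in enumerate(text):
--         pos.setdefault(ch, []).append(idx)
--     j = -1
--     for c in acr:
--         lst = pos.get(c, [])
--         lo, hi = 0, len(lst)
--         while lo < hi:
--             mid = (lo + hi) // 2
--             if lst[mid] > j:
--                 hi = mid
--             else:
--                 lo = mid + 1
--         if lo == len(lst):
--             return False
--         j = lst[lo]
--     return True
-- ===== Notes on version B (the rewrite author's own statement) =====
-- stated objective: alternative
-- what changed: Replaced the nested two-pointer scan with a precomputed char->positions index built in one pass over text, followed by a per-acronym-character binary search for the first position after the previous match.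
import Mathlib
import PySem

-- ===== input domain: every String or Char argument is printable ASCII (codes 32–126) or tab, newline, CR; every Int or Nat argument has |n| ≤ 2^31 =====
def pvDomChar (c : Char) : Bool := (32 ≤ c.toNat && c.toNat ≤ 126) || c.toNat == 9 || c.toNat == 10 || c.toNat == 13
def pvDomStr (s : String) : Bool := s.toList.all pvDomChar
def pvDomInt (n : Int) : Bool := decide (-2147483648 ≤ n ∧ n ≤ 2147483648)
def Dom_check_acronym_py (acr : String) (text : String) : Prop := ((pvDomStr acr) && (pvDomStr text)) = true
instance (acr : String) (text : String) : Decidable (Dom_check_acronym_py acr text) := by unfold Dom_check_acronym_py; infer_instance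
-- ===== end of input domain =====

-- B replaces A's nested two-pointer scan by a char->positions index plus a binary search per acronym character (alternative algorithm; same results).

-- ===== PORT A =====
-- inner 'while j < len(text): if text[j]==acr[i]: break; j += 1' — returns the final j
def pvInnerA (c : Char) (text : List Char) (j : Nat) : Nat :=
  if h : j < text.length then
    if text[j] == c then j else pvInnerA c text (j + 1)
  else j
termination_by text.length - j

-- outer 'while i < len(acr): …' — returns the final i
def pvOuterA (acr text : List Char) (i j : Nat) : Nat :=
  if h : i < acr.length then
    let j' := pvInnerA acr[i] text j
    if j' ≥ text.length then i
    else pvOuterA acr text (i + 1) (j' + 1)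
  else i
termination_by acr.length - i

def check_acronym_py (acr : String) (text : String) : Bool :=
  decide (pvOuterA acr.toList text.toList 0 0 ≥ acr.toList.length)

-- ===== PORT B =====
-- 'for idx, ch in enumerate(text): pos.setdefault(ch, []).append(idx)' — idx carried explicitly
def pvBuildPos (d : PySem.Dict Char (List Int)) (idx : Int) : List Char → PySem.Dict Char (List Int)
  | [] => d
  | ch :: rest => pvBuildPos (d.insert ch (d.getD ch [] ++ [idx])) (idx + 1) rest

-- 'while lo < hi: mid = (lo+hi)//2; …' — lst[mid] is in range (0 ≤ mid < hi ≤ len), so getD is exact here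
def pvBisect (lst : List Int) (j : Int) (lo hi : Nat) : Nat :=
  if lo < hi then
    if lst.getD ((lo + hi) / 2) 0 > j then pvBisect lst j lo ((lo + hi) / 2)
    else pvBisect lst j ((lo + hi) / 2 + 1) hi
  else lo
termination_by hi - lo
decreasing_by all_goals omega

-- 'for c in acr: …'
def pvLoopB (pos : PySem.Dict Char (List Int)) (j : Int) : List Char → Bool
  | [] => true
  | c :: cs =>
    let lst := pos.getD c []
    let lo := pvBisect lst j 0 lst.length
    if lo = lst.length then false
    else pvLoopB pos (lst.getD lo 0) cs

def check_acronym_py_alt (acr : String) (text : String) : Bool :=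
  pvLoopB (pvBuildPos PySem.Dict.empty 0 text.toList) (-1) acr.toList

-- ===== PRECONDITION & SPEC =====
def Spec_check_acronym_py (acr : String) (text : String) (out : Bool) : Prop := out = check_acronym_py_alt acr text
instance (acr : String) (text : String) (out : Bool) : Decidable (Spec_check_acronym_py acr text out) := by unfold Spec_check_acronym_py; infer_instance

-- ===== CLAIM (what is proved, stated in full; the proofs are below) =====
def Claim_equal_check_acronym_py : Prop := ∀ (acr : String) (text : String), Dom_check_acronym_py acr text → Spec_check_acronym_py acr text (check_acronym_py acr text)

-- ===== LEMMAS AND PROOFS =====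

-- reference list of positions of c in text, offset by idx
def pvPosList (c : Char) (idx : Int) : List Char → List Int
  | [] => []
  | ch :: rest => (if ch == c then [idx] else []) ++ pvPosList c (idx + 1) rest

theorem pvBuildPos_getD (c : Char) : ∀ (text : List Char) (d : PySem.Dict Char (List Int)) (idx : Int),
    (pvBuildPos d idx text).getD c [] = d.getD c [] ++ pvPosList c idx text := by
  intro text
  induction text with
  | nil => intro d idx; simp [pvBuildPos, pvPosList]
  | cons ch rest ih =>
    intro d idx
    rw [pvBuildPos, pvPosList, ih]
    rw [PySem.Dict.getD_insert]
    by_cases h : c = ch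
    · subst h; simp
    · have h' : ¬ (ch == c) = true := by simp only [beq_iff_eq]; exact fun hh => h hh.symm
      simp [h, h']

theorem pvPosList_mem (c : Char) : ∀ (text : List Char) (idx x : Int),
    x ∈ pvPosList c idx text ↔ ∃ n : Nat, ∃ h : n < text.length, text[n] = c ∧ x = idx + n := by
  intro text
  induction text with
  | nil => intro idx x; simp [pvPosList]
  | cons ch rest ih =>
    intro idx x
    rw [pvPosList]
    simp only [List.mem_append]
    constructor
    · intro hx
      rcases hx with hx | hx
      · by_cases h : ch == c
        · refine ⟨0, by simp, by simpa using h, ?_⟩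
          rw [if_pos h] at hx; simp at hx; simp [hx]
        · rw [if_neg h] at hx; simp at hx
      · rcases (ih (idx + 1) x).mp hx with ⟨n, hn, hc, hxe⟩
        exact ⟨n + 1, by simpa using Nat.succ_lt_succ hn, by simpa using hc, by push_cast [hxe]; ring⟩
    · rintro ⟨n, hn, hc, hxe⟩
      cases n with
      | zero =>
        left
        have : (ch == c) = true := by simp; simpa using hc
        rw [if_pos this]; simp [hxe]
      | succ m =>
        right
        refine (ih (idx + 1) x).mpr ⟨m, by simp at hn; omega, by simpa using hc, ?_⟩
        push_cast [hxe]; ring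

theorem pvPosList_lower (c : Char) (text : List Char) (idx x : Int)
    (hx : x ∈ pvPosList c idx text) : idx ≤ x := by
  rcases (pvPosList_mem c text idx x).mp hx with ⟨n, _, _, hxe⟩
  have : (0 : Int) ≤ n := Int.natCast_nonneg n
  omega

theorem pvPosList_pairwise (c : Char) : ∀ (text : List Char) (idx : Int),
    (pvPosList c idx text).Pairwise (· < ·) := by
  intro text
  induction text with
  | nil => intro idx; simp [pvPosList]
  | cons ch rest ih =>
    intro idx
    rw [pvPosList]
    by_cases h : ch == c
    · rw [if_pos h]
      simp only [List.singleton_append, List.pairwise_cons]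
      refine ⟨fun x hx => ?_, ih (idx + 1)⟩
      have := pvPosList_lower c rest (idx + 1) x hx
      omega
    · rw [if_neg h]; simpa using ih (idx + 1)

-- characterisation of A's inner scan: first match index ≥ j, or text.length
theorem pvInnerA_spec (c : Char) (text : List Char) :
    ∀ j, j ≤ text.length →
    j ≤ pvInnerA c text j ∧ pvInnerA c text j ≤ text.length ∧
    (∀ k (hk : k < text.length), j ≤ k → k < pvInnerA c text j → text[k] ≠ c) ∧
    (∀ h : pvInnerA c text j < text.length, text[pvInnerA c text j] = c) := by
  intro j
  induction hn : text.length - j using Nat.strong_induction_on generalizing j with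
  | _ n ih =>
    intro hj
    rcases Nat.lt_or_ge j text.length with h | h
    · rw [pvInnerA, dif_pos h]
      by_cases hc : text[j] == c
      · rw [if_pos hc]
        refine ⟨le_refl _, le_of_lt h, fun k hk h1 h2 => by omega, fun _ => by simpa using hc⟩
      · rw [if_neg hc]
        have hrec := ih (text.length - (j+1)) (by omega) (j+1) rfl h
        refine ⟨by omega, hrec.2.1, fun k hk h1 h2 => ?_, hrec.2.2.2⟩
        rcases Nat.eq_or_lt_of_le h1 with he | hlt
        · subst he; simpa using hc
        · exact hrec.2.2.1 k hk hlt h2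
    · have hje : j = text.length := by omega
      rw [pvInnerA, dif_neg (by omega)]
      exact ⟨le_refl _, by omega, fun k hk h1 h2 => by omega, fun hlt => by omega⟩

-- binary-search correctness on a list increasing in its indices
theorem pvBisect_spec (P : List Int) (j : Int)
    (hmono : ∀ a b (ha : a < P.length) (hb : b < P.length), a < b → P[a] < P[b]) :
    ∀ lo hi, lo ≤ hi → hi ≤ P.length →
    (∀ k (h : k < P.length), k < lo → P[k] ≤ j) →
    (∀ k (h : k < P.length), hi ≤ k → j < P[k]) →
    pvBisect P j lo hi ≤ P.length ∧
    (∀ k (h : k < P.length), k < pvBisect P j lo hi → P[k] ≤ j) ∧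
    (∀ k (h : k < P.length), pvBisect P j lo hi ≤ k → j < P[k]) := by
  intro lo hi
  induction hn : hi - lo using Nat.strong_induction_on generalizing lo hi with
  | _ n ih =>
    intro hlohi hhi hlow hhigh
    rcases Nat.lt_or_ge lo hi with h | h
    · rw [pvBisect, if_pos h]
      have hmid : (lo + hi) / 2 < hi := by omega
      have hmidlo : lo ≤ (lo + hi) / 2 := by omega
      have hmlen : (lo + hi) / 2 < P.length := by omega
      rw [List.getD_eq_getElem P 0 hmlen]
      by_cases hcmp : P[(lo + hi) / 2] > j
      · rw [if_pos hcmp]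
        exact ih ((lo + hi) / 2 - lo) (by omega) lo ((lo + hi) / 2) rfl hmidlo (by omega) hlow
          (fun k hk hmk => by
            rcases Nat.eq_or_lt_of_le hmk with he | hlt
            · subst he; exact hcmp
            · exact lt_trans hcmp (hmono _ k hmlen hk hlt))
      · rw [if_neg hcmp]
        rw [not_lt] at hcmp
        exact ih (hi - ((lo + hi) / 2 + 1)) (by omega) ((lo + hi) / 2 + 1) hi rfl (by omega) hhi
          (fun k hk hkm => by
            rcases Nat.eq_or_lt_of_le (Nat.le_of_lt_succ hkm) with he | hlt
            · subst he; exact hcmp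
            · exact le_trans (le_of_lt (hmono k _ hk hmlen hlt)) hcmp)
          hhigh
    · rw [pvBisect, if_neg (by omega)]
      have : lo = hi := by omega
      subst this
      exact ⟨hhi, fun k hk hkl => hlow k hk hkl, fun k hk hkl => hhigh k hk hkl⟩

-- main bridge: A's outer loop from (i, j) decides the same as B's loop with last-match j-1
theorem pvOuter_loopB (acr text : List Char) :
    ∀ i j, i ≤ acr.length → j ≤ text.length →
    decide (pvOuterA acr text i j ≥ acr.length) =
      pvLoopB (pvBuildPos PySem.Dict.empty 0 text) ((j : Int) - 1) (acr.drop i) := by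
  intro i j
  induction hn : acr.length - i using Nat.strong_induction_on generalizing i j with
  | _ n ih =>
    intro hi hj
    rcases Nat.lt_or_ge i acr.length with h | h
    · have hdrop : acr.drop i = acr[i] :: acr.drop (i + 1) := List.drop_eq_getElem_cons h
      set c := acr[i] with hc
      -- B side data
      have hP : (pvBuildPos PySem.Dict.empty 0 text).getD c [] = pvPosList c 0 text := by
        rw [pvBuildPos_getD]; simp
      set P := pvPosList c 0 text with hPdef
      have hmono : ∀ a b (ha : a < P.length) (hb : b < P.length), a < b → P[a] < P[b] := by
        intro a b ha hb hab
        exact (List.pairwise_iff_getElem.mp (pvPosList_pairwise c text 0)) a b ha hb hab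
      have hbs := pvBisect_spec P ((j : Int) - 1) hmono 0 P.length (Nat.zero_le _) (le_refl _)
        (fun k hk hk0 => by omega) (fun k hk hkl => by omega)
      set r := pvBisect P ((j : Int) - 1) 0 P.length with hr
      -- A side data
      have hin := pvInnerA_spec c text j hj
      set n0 := pvInnerA c text j with hn0
      rw [pvOuterA, dif_pos h]
      rw [hdrop, pvLoopB]
      simp only [hP, ← hr, ← hc, ← hn0]
      by_cases hfound : n0 < text.length
      · -- A finds a match at n0; show r < P.length and P[r] = n0
        have htc : text[n0] = c := hin.2.2.2 hfound
        have hn0mem : ((n0 : Int)) ∈ P := by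
          rw [hPdef, pvPosList_mem]
          exact ⟨n0, hfound, htc, by simp⟩
        obtain ⟨k0, hk0, hk0e⟩ := List.mem_iff_getElem.mp hn0mem
        have hk0r : r ≤ k0 := by
          by_contra hlt
          have := hbs.2.1 k0 hk0 (by omega)
          rw [hk0e] at this
          have hjn0 : j ≤ n0 := hin.1
          omega
        have hrlen : r < P.length := by omega
        have hPr : P[r] = (n0 : Int) := by
          -- P[r] is a match index ≥ j; n0 is the least such; and P[r] ≤ P[k0] = n0
          have hgt : ((j : Int) - 1) < P[r] := hbs.2.2 r hrlen (le_refl _)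
          obtain ⟨m, hm, hmc, hme⟩ := (pvPosList_mem c text 0 P[r]).mp (by
            rw [hPdef] at *; exact List.getElem_mem hrlen)
          have hjm : j ≤ m := by omega
          have hn0m : n0 ≤ m := by
            by_contra hmn
            exact hin.2.2.1 m hm hjm (by omega) hmc
          have hle : P[r] ≤ P[k0] := by
            rcases Nat.eq_or_lt_of_le hk0r with he | hlt
            · subst he; exact le_rfl
            · exact le_of_lt (hmono r k0 hrlen hk0 hlt)
          rw [hk0e] at hle
          omega
        rw [if_neg (by omega), if_neg (by omega)]
        rw [List.getD_eq_getElem P 0 hrlen, hPr]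
        have := ih (acr.length - (i + 1)) (by omega) (i + 1) (n0 + 1) rfl h hfound
        rw [this]
        norm_num
      · -- no match: n0 = text.length; show r = P.length, both sides false
        have hn0e : n0 = text.length := by have := hin.2.1; omega
        have hrlen : r = P.length := by
          by_contra hne
          have hrl : r < P.length := by
            have := hbs.1; omega
          have hgt := hbs.2.2 r hrl (le_refl _)
          obtain ⟨m, hm, hmc, hme⟩ := (pvPosList_mem c text 0 P[r]).mp (by
            rw [hPdef] at *; exact List.getElem_mem hrl)
          have hjm : j ≤ m := by omega
          exact hin.2.2.1 m hm hjm (by omega) hmc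
        rw [if_pos hrlen, if_pos (by omega)]
        simp [Nat.not_le.mpr h]
    · have : acr.drop i = [] := List.drop_eq_nil_of_le h
      rw [pvOuterA, dif_neg (by omega), this, pvLoopB]
      simp [h]

-- ===== VERDICT (by name: the statement is the Claim_ definition above) =====
theorem check_acronym_py_spec : Claim_equal_check_acronym_py := by
  intro acr text _
  unfold Spec_check_acronym_py check_acronym_py check_acronym_py_alt
  have := pvOuter_loopB acr.toList text.toList 0 0 (Nat.zero_le _) (Nat.zero_le _)
  simpa using this
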